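-- pv_equiv track=rewrite | github.com/alexandraback/datacollection | solutions_5631989306621952_0/Python/chrisx/A.py | solve
-- ===== SOURCE A (Python) =====
-- def solve(S):
--     makschar = [None]*len(S)
--     for ind, char in enumerate(S):
--         if ind == 0:
--             makschar[ind] = ord(char)
--             continue
--         makschar[ind] = max(makschar[ind-1], ord(char))
--     # leftright = ['-']*len(S)
--     left = []
--     right = []
--     for ind in range(len(S)-1,-1,-1):
--         if ord(S[ind]) == makschar[ind]:  # put to left
--             left.append(S[ind])
--         else:
--             right.append(S[ind])
--     return ''.join(left)+''.join(right[::-1])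
-- ===== SOURCE B (Python) =====
-- def solve(S):
--     running_max = -1
--     maxima = []
--     rest = []
--     for char in S:
--         if ord(char) >= running_max:
--             maxima.append(char)
--             running_max = ord(char)
--         else:
--             rest.append(char)
--     return ''.join(maxima[::-1]) + ''.join(rest)
-- ===== Notes on version B (the rewrite author's own statement) =====
-- stated objective: simpler
-- what changed: B replaces A's precomputed prefix-max array plus separate reverse-index partition loop with a single forward pass keeping one running-max integer, emitting reversed maxima plus forward-ordered rest (one pass, no index arithmetic, no auxiliary array).
import Mathlib
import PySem

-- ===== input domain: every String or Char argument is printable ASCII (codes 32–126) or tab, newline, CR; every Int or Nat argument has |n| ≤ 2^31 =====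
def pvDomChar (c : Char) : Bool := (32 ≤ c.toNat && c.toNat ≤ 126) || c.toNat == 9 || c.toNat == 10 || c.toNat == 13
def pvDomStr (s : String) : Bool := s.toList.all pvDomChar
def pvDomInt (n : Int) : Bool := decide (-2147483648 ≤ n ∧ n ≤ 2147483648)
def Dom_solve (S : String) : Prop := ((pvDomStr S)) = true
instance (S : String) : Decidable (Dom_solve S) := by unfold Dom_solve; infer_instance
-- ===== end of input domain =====

-- B replaces A's prefix-max array + reverse-index partition loop with one forward
-- pass keeping a single running-max integer (objective: simpler).


-- ===== PORT A =====
-- ord(c)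
def ordC (c : Char) : Int := (c.toNat : Int)

-- makschar[ind] = max(makschar[ind-1], ord(char)) for ind > 0 (prev carries makschar[ind-1])
def maksAux (prev : Int) (cs : List Char) : List Int :=
  match cs with
  | [] => []
  | c :: t =>
    let m := max prev (ordC c)
    m :: maksAux m t

-- the first loop of A: makschar[0] = ord(S[0]), then running max
def maks (cs : List Char) : List Int :=
  match cs with
  | [] => []
  | c :: t => ordC c :: maksAux (ordC c) t

-- the second loop of A: descending index scan = scan over the reversed (char, makschar) pairs,
-- appending to left / right exactly as the Python does
def solveLoop (pairs : List (Char × Int)) (left right : List Char) : List Char × List Char :=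
  match pairs with
  | [] => (left, right)
  | (c, m) :: t =>
    if ordC c = m then solveLoop t (left ++ [c]) right
    else solveLoop t left (right ++ [c])

def solve (S : String) : String :=
  let cs := S.toList
  let lr := solveLoop ((cs.zip (maks cs)).reverse) [] []
  String.mk (lr.1 ++ lr.2.reverse)

-- ===== PORT B =====
-- one forward pass with a running max
def solveAltLoop (cs : List Char) (runmax : Int) (maxima rest : List Char) : List Char × List Char :=
  match cs with
  | [] => (maxima, rest)
  | c :: t =>
    if ordC c ≥ runmax then solveAltLoop t (ordC c) (maxima ++ [c]) rest
    else solveAltLoop t runmax maxima (rest ++ [c])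

def solve_alt (S : String) : String :=
  let mr := solveAltLoop S.toList (-1) [] []
  String.mk (mr.1.reverse ++ mr.2)

-- ===== PRECONDITION & SPEC =====
def Spec_solve (S : String) (out : String) : Prop := out = solve_alt S
instance (S : String) (out : String) : Decidable (Spec_solve S out) := by unfold Spec_solve; infer_instance

-- ===== CLAIM (what is proved, stated in full; the proofs are below) =====
def Claim_equal_solve : Prop := ∀ (S : String), Dom_solve S → Spec_solve S (solve S)

-- ===== LEMMAS AND PROOFS =====

-- common reference partition: forward, carrying the running maximum
def part (prev : Int) (cs : List Char) : List Char × List Char :=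
  match cs with
  | [] => ([], [])
  | c :: t =>
    let p := part (max prev (ordC c)) t
    if ordC c ≥ prev then (c :: p.1, p.2) else (p.1, c :: p.2)

theorem ordC_nonneg (c : Char) : 0 ≤ ordC c := by
  simp [ordC]

theorem solveLoop_append (p q : List (Char × Int)) (l r : List Char) :
    solveLoop (p ++ q) l r = solveLoop q (solveLoop p l r).1 (solveLoop p l r).2 := by
  induction p generalizing l r with
  | nil => simp [solveLoop]
  | cons hd t ih =>
    obtain ⟨c, m⟩ := hd
    simp only [List.cons_append, solveLoop]
    split <;> exact ih _ _

theorem solveLoop_maks (cs : List Char) (prev : Int) (l r : List Char) :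
    solveLoop ((cs.zip (maksAux prev cs)).reverse) l r
      = (l ++ (part prev cs).1.reverse, r ++ (part prev cs).2.reverse) := by
  induction cs generalizing prev l r with
  | nil => simp [maksAux, part, solveLoop]
  | cons c t ih =>
    simp only [maksAux, List.zip_cons_cons, List.reverse_cons, solveLoop_append, part]
    rw [ih]
    by_cases h : ordC c ≥ prev
    · have hm : ordC c = max prev (ordC c) := by omega
      simp [solveLoop, hm.symm, h]
    · have hm : ¬ (ordC c = max prev (ordC c)) := by omega
      simp [solveLoop, hm, h]

theorem solveAltLoop_part (cs : List Char) (runmax : Int) (mx rest : List Char) :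
    solveAltLoop cs runmax mx rest
      = (mx ++ (part runmax cs).1, rest ++ (part runmax cs).2) := by
  induction cs generalizing runmax mx rest with
  | nil => simp [solveAltLoop, part]
  | cons c t ih =>
    simp only [solveAltLoop, part]
    by_cases h : ordC c ≥ runmax
    · have hm : max runmax (ordC c) = ordC c := by omega
      simp [h, hm, ih]
    · have hm : max runmax (ordC c) = runmax := by omega
      simp [h, hm, ih]

theorem solve_eq_alt (S : String) : solve S = solve_alt S := by
  unfold solve solve_alt
  cases hcs : S.toList with
  | nil => simp [maks, solveLoop, solveAltLoop]
  | cons c t =>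
    have hge : ordC c ≥ (-1 : Int) := le_trans (by norm_num) (ordC_nonneg c)
    have hmax : max (-1 : Int) (ordC c) = ordC c := by omega
    simp only [maks, List.zip_cons_cons, List.reverse_cons, solveLoop_append,
      solveLoop_maks, solveAltLoop, hge, if_pos, solveAltLoop_part]
    simp [solveLoop]

-- ===== VERDICT (by name: the statement is the Claim_ definition above) =====
theorem solve_spec : Claim_equal_solve := by
  intro S _
  exact solve_eq_alt S
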